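-- pv_equiv track=rewrite | github.com/kaliptomena-coder/sequence_alignment_project | src/iterative_refinement.py | apply_group_gaps
-- ===== SOURCE A (Python) =====
-- def apply_group_gaps(group, old_rep, new_rep):
--     """
--     Propagate a new gap pattern from a re-aligned representative
--     to every sequence in the group.
--
--     Parameters
--     ----------
--     group   : list of str – the original aligned sequences
--     old_rep : str         – the representative WITHOUT gaps (was used for re-alignment)
--     new_rep : str         – the representative WITH NEW gaps (output of NW)
--
--     Returns
--     -------
--     list of str – all sequences with the new gap pattern applied
--     """
--     new_group = []
--     for seq in group:
--         new_seq = ""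
--         idx     = 0   # position in the un-gapped sequence
--         for char in new_rep:
--             if char == '-':
--                 new_seq += '-'        # insert a gap where new_rep has a gap
--             else:
--                 # Take the character from the original aligned sequence
--                 new_seq += seq[idx] if idx < len(seq) else '-'
--                 idx += 1
--         new_group.append(new_seq)
--     return new_group
-- ===== SOURCE B (Python) =====
-- def apply_group_gaps(group, old_rep, new_rep):
--     # Run-length encode new_rep's gap pattern once, compile it to a template of
--     # literal gap blocks and slice bounds, then render each sequence by slicing.
--     runs = []                      # [is_gap, run_length]
--     for c in new_rep:
--         g = (c == '-')
--         if runs and runs[-1][0] == g: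
--             runs[-1][1] += 1
--         else:
--             runs.append([g, 1])
--     n = sum(l for g, l in runs if not g)   # number of non-gap slots
--     pieces = []                    # '-'*l literals, or (start, end) slice bounds
--     pos = 0
--     for g, l in runs:
--         if g:
--             pieces.append('-' * l)
--         else:
--             pieces.append((pos, pos + l))
--             pos += l
--     out = []
--     for seq in group:
--         padded = seq[:n] + '-' * (n - len(seq))
--         out.append(''.join(p if isinstance(p, str) else padded[p[0]:p[1]] for p in pieces))
--     return out
-- ===== Notes on version B (the rewrite author's own statement) =====
-- stated objective: faster
-- what changed: Instead of scanning new_rep per sequence with a running index, per-character bounds check and quadratic string += concatenation, B run-length encodes new_rep's gap pattern once, compiles it into a template of literal gap blocks and (start,end) slice bounds, and renders each sequence by padding it and joining bulk slices.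
import Mathlib
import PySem

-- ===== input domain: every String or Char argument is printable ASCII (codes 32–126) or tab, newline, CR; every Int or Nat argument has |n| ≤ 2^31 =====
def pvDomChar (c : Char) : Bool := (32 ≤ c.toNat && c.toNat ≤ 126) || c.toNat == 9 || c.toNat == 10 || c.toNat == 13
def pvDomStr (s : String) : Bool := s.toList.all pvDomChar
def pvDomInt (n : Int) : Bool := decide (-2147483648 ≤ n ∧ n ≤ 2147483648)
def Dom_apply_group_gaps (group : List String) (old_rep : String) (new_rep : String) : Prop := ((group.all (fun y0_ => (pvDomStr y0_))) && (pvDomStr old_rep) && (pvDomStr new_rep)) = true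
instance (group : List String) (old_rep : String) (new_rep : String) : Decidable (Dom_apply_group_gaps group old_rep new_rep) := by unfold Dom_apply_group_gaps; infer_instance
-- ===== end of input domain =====

-- B replaces A's per-character running-index scan with quadratic += concatenation by run-length-encoding new_rep's gap pattern once and rendering each sequence from precompiled gap literals and slice bounds (objective: faster, measured).


-- ===== PORT A =====
-- inner loop of A: fold over new_rep with state (built chars, idx); 'seq[idx] if idx < len(seq) else "-"'
def pvAStep (seq : List Char) (st : List Char × Nat) (ch : Char) : List Char × Nat :=
  if ch = '-' then (st.1 ++ ['-'], st.2)
  else (st.1 ++ [if st.2 < seq.length then seq.getD st.2 '-' else '-'], st.2 + 1)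

def apply_group_gaps (group : List String) (old_rep : String) (new_rep : String) : List String :=
  (group.foldl (fun new_group seq =>
    new_group ++ [String.mk (new_rep.toList.foldl (pvAStep seq.toList) ([], 0)).1]) [])

-- ===== PORT B =====
-- one RLE step: extend the last run if the gap flag matches, else start a new run
def pvRleStep (rs : List (Bool × Nat)) (c : Char) : List (Bool × Nat) :=
  let g := c == '-'
  match rs.getLast? with
  | some (g', l) => if g' == g then rs.dropLast ++ [(g, l + 1)] else rs ++ [(g, 1)]
  | none => [(g, 1)]

-- compile the runs into pieces: gap runs become literal '-'-blocks, letter runs slice bounds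
def pvPieces : Nat → List (Bool × Nat) → List (Sum (List Char) (Nat × Nat))
  | _, [] => []
  | pos, (true, l) :: rs => Sum.inl (List.replicate l '-') :: pvPieces pos rs
  | pos, (false, l) :: rs => Sum.inr (pos, pos + l) :: pvPieces (pos + l) rs

-- seq[:n] + '-'*(n-len(seq))
def pvFit (s : List Char) (n : Nat) : List Char := s.take n ++ List.replicate (n - s.length) '-'

def apply_group_gaps_alt (group : List String) (old_rep : String) (new_rep : String) : List String :=
  let runs := new_rep.toList.foldl pvRleStep []
  let n := runs.foldl (fun a r => if r.1 then a else a + r.2) 0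
  let pieces := pvPieces 0 runs
  group.map (fun seq =>
    let padded := pvFit seq.toList n
    String.mk (pieces.map (fun p => match p with
      | Sum.inl gs => gs
      | Sum.inr (s, e) => padded.extract s e)).flatten)

-- ===== PRECONDITION & SPEC =====
def Spec_apply_group_gaps (group : List String) (old_rep : String) (new_rep : String) (out : List String) : Prop := out = apply_group_gaps_alt group old_rep new_rep
instance (group : List String) (old_rep : String) (new_rep : String) (out : List String) : Decidable (Spec_apply_group_gaps group old_rep new_rep out) := by unfold Spec_apply_group_gaps; infer_instance

-- ===== CLAIM (what is proved, stated in full; the proofs are below) =====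
def Claim_equal_apply_group_gaps : Prop := ∀ (group : List String) (old_rep : String) (new_rep : String), Dom_apply_group_gaps group old_rep new_rep → Spec_apply_group_gaps group old_rep new_rep (apply_group_gaps group old_rep new_rep)

-- ===== LEMMAS AND PROOFS =====

-- gap mask of the representative
def pvMask (rep : List Char) : List Bool := rep.map (fun c => c == '-')

-- decode runs back to a mask
def pvExpand (rs : List (Bool × Nat)) : List Bool := rs.flatMap (fun r => List.replicate r.2 r.1)

-- number of non-gap positions in a mask
def pvCF (m : List Bool) : Nat := (m.filter (fun b => !b)).length

-- the reference interleaver: '-' at gap positions, pool consumed in order at letter positions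
def pvMergeMask : List Bool → List Char → List Char
  | [], _ => []
  | true :: ms, pool => '-' :: pvMergeMask ms pool
  | false :: ms, pool => pool.headD '-' :: pvMergeMask ms pool.tail

-- the character A emits at un-gapped position j
def pvAChar (seq : List Char) (j : Nat) : Char :=
  if j < seq.length then seq.getD j '-' else '-'

-- A's inner fold, written as structural recursion
def pvAGo (seq : List Char) : List Char → Nat → List Char
  | [], _ => []
  | c :: cs, idx =>
      if c = '-' then '-' :: pvAGo seq cs idx
      else pvAChar seq idx :: pvAGo seq cs (idx + 1)

lemma pvFold_eq_go (seq : List Char) (rep : List Char) :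
    ∀ (acc : List Char) (idx : Nat),
      rep.foldl (pvAStep seq) (acc, idx) = (acc ++ pvAGo seq rep idx, idx + pvCF (pvMask rep)) := by
  induction rep with
  | nil => intro acc idx; simp [pvAGo, pvCF, pvMask]
  | cons c cs ih =>
      intro acc idx
      by_cases h : c = '-'
      · simp [List.foldl, pvAStep, h, ih, pvAGo, pvCF, pvMask, List.filter]
      · simp [List.foldl, pvAStep, h, ih, pvAGo, pvCF, pvMask, List.filter, pvAChar]
        omega

lemma pvGetD_tail (pool : List Char) (k : Nat) (d : Char) :
    pool.tail.getD k d = pool.getD (k + 1) d := by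
  cases pool <;> simp [List.getD]

lemma pvHeadD_eq_getD (pool : List Char) (d : Char) : pool.headD d = pool.getD 0 d := by
  cases pool <;> simp [List.getD]

lemma pvGo_eq_merge (seq : List Char) (rep : List Char) :
    ∀ (idx : Nat) (pool : List Char),
      (∀ k, k < pvCF (pvMask rep) → pool.getD k '-' = pvAChar seq (idx + k)) →
      pvAGo seq rep idx = pvMergeMask (pvMask rep) pool := by
  induction rep with
  | nil => intro idx pool _; simp [pvAGo, pvMergeMask, pvMask]
  | cons c cs ih =>
      intro idx pool hp
      by_cases h : c = '-'
      · simp only [pvAGo, pvMask, List.map, h, if_pos rfl, if_true]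
        have := ih idx pool (by
          intro k hk
          exact hp k (by simp [pvCF, pvMask, List.filter, h] at *; omega))
        simp [pvMergeMask, this, pvMask]
      · have hc : (c == '-') = false := by simp [h]
        simp only [pvAGo, if_neg h, pvMask, List.map, hc]
        show pvAChar seq idx :: pvAGo seq cs (idx + 1) = pvMergeMask (false :: pvMask cs) pool
        have h0 : pool.headD '-' = pvAChar seq idx := by
          rw [pvHeadD_eq_getD]
          simpa using hp 0 (by simp [pvCF, pvMask, hc])
        rw [pvMergeMask, h0]
        refine congrArg _ ?_
        apply ih (idx + 1) pool.tail
        intro k hk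
        rw [pvGetD_tail]
        have := hp (k + 1) (by simp [pvCF, pvMask, List.filter, hc] at *; omega)
        rw [this]
        congr 1
        omega

lemma pvFit_spec (seq : List Char) (n : Nat) :
    ∀ k, k < n → (pvFit seq n).getD k '-' = pvAChar seq k := by
  intro k hk
  unfold pvFit pvAChar
  by_cases hl : k < seq.length
  · have htake : k < (seq.take n).length := by simp; omega
    rw [List.getD_eq_getElem?_getD, List.getElem?_append_left htake]
    simp [List.getElem?_take, hk, hl, List.getD_eq_getElem?_getD]
  · have hlen : (seq.take n).length = seq.length := by simp; omega
    rw [List.getD_eq_getElem?_getD, List.getElem?_append_right (by omega)]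
    simp only [List.length_take]
    simp [show k - min n seq.length < n - seq.length by omega, hl]

lemma pvFit_length (seq : List Char) (n : Nat) : (pvFit seq n).length = n := by
  by_cases h : seq.length ≤ n <;> simp [pvFit] <;> omega

-- RLE step decodes correctly
lemma pvExpand_step (rs : List (Bool × Nat)) (c : Char) :
    pvExpand (pvRleStep rs c) = pvExpand rs ++ [c == '-'] := by
  unfold pvRleStep
  cases hrs : rs.getLast? with
  | none =>
      have : rs = [] := List.getLast?_eq_none_iff.mp hrs
      simp [this, pvExpand]
  | some p =>
      obtain ⟨g', l⟩ := p
      have hne : rs ≠ [] := by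
        intro h; rw [h] at hrs; simp at hrs
      have hsplit : rs.dropLast ++ [(g', l)] = rs := by
        have h1 := List.dropLast_concat_getLast hne
        have h2 : rs.getLast hne = (g', l) := by
          have h3 := List.getLast?_eq_getLast (l := rs) hne
          rw [hrs] at h3
          exact Option.some_inj.mp h3.symm
        rw [h2] at h1
        exact h1
      by_cases hg : g' = (c == '-')
      · simp only [hg, beq_self_eq_true, if_true]
        conv_rhs => rw [← hsplit]
        simp [pvExpand, List.replicate_succ', hg]
      · have : (g' == (c == '-')) = false := by simp [hg]
        simp [this, pvExpand]

lemma pvExpand_runs (rep : List Char) :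
    pvExpand (rep.foldl pvRleStep []) = pvMask rep := by
  induction rep using List.reverseRecOn with
  | nil => simp [pvExpand, pvMask]
  | append_singleton xs x ih =>
      rw [List.foldl_append]
      simp [pvExpand_step, ih, pvMask]

-- the port's letter count equals pvCF of the decoded mask
lemma pvN_eq_cf (rs : List (Bool × Nat)) :
    ∀ a : Nat, rs.foldl (fun a r => if r.1 then a else a + r.2) a = a + pvCF (pvExpand rs) := by
  induction rs with
  | nil => intro a; simp [pvExpand, pvCF]
  | cons r rs ih =>
      intro a
      obtain ⟨g, l⟩ := r
      cases g <;>
        simp [List.foldl, ih, pvExpand, pvCF, List.filter_append, List.filter_replicate] <;> omega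

lemma pvMerge_rep_true (l : Nat) (ms : List Bool) (q : List Char) :
    pvMergeMask (List.replicate l true ++ ms) q = List.replicate l '-' ++ pvMergeMask ms q := by
  induction l with
  | zero => simp
  | succ m ih => simp [List.replicate_succ, pvMergeMask, ih]

lemma pvMerge_rep_false (l : Nat) (ms : List Bool) (q : List Char) (h : l ≤ q.length) :
    pvMergeMask (List.replicate l false ++ ms) q = q.take l ++ pvMergeMask ms (q.drop l) := by
  induction l generalizing q with
  | zero => simp
  | succ m ih =>
      cases q with
      | nil => simp at h
      | cons a as =>
          simp only [List.replicate_succ, List.cons_append, pvMergeMask]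
          simp [ih as (by simpa using h)]

-- rendering the compiled pieces equals the reference interleaver
lemma pvPieces_render (pool : List Char) :
    ∀ (rs : List (Bool × Nat)) (pos : Nat),
      pos + pvCF (pvExpand rs) ≤ pool.length →
      ((pvPieces pos rs).map (fun p => match p with
        | Sum.inl gs => gs
        | Sum.inr (s, e) => pool.extract s e)).flatten
      = pvMergeMask (pvExpand rs) (pool.drop pos) := by
  intro rs
  induction rs with
  | nil => intro pos _; simp [pvPieces, pvExpand, pvMergeMask]
  | cons r rs ih =>
      intro pos hle
      obtain ⟨g, l⟩ := r
      cases g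
      · -- letter run
        have hexp : pvExpand ((false, l) :: rs) = List.replicate l false ++ pvExpand rs := by
          simp [pvExpand]
        have hcf : pvCF (pvExpand ((false, l) :: rs)) = l + pvCF (pvExpand rs) := by
          simp [hexp, pvCF, List.filter_append, List.filter_replicate]
        rw [hcf] at hle
        simp only [pvPieces, List.map, List.flatten]
        rw [hexp, pvMerge_rep_false l (pvExpand rs) (pool.drop pos) (by simp; omega)]
        rw [List.drop_drop]
        rw [ih (pos + l) (by omega)]
        have : pool.extract pos (pos + l) = (pool.drop pos).take l := by
          rw [List.extract_eq_drop_take]; simp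
        rw [this]
        simp
      · -- gap run
        have hexp : pvExpand ((true, l) :: rs) = List.replicate l true ++ pvExpand rs := by
          simp [pvExpand]
        have hcf : pvCF (pvExpand ((true, l) :: rs)) = pvCF (pvExpand rs) := by
          simp [hexp, pvCF, List.filter_append, List.filter_replicate]
        rw [hcf] at hle
        simp only [pvPieces, List.map, List.flatten]
        rw [hexp, pvMerge_rep_true, ih pos hle]
        simp

lemma pvFoldl_append_map {α β : Type} (f : α → β) (l : List α) :
    ∀ acc : List β, l.foldl (fun a x => a ++ [f x]) acc = acc ++ l.map f := by
  induction l with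
  | nil => intro acc; simp
  | cons x xs ih => intro acc; simp [List.foldl, ih]

-- ===== VERDICT (by name: the statement is the Claim_ definition above) =====
theorem apply_group_gaps_spec : Claim_equal_apply_group_gaps := by
  intro group old_rep new_rep _
  unfold Spec_apply_group_gaps apply_group_gaps apply_group_gaps_alt
  rw [pvFoldl_append_map (fun seq => String.mk (new_rep.toList.foldl (pvAStep seq.toList) ([], 0)).1) group]
  simp only [List.nil_append]
  apply List.map_congr_left
  intro seq _
  rw [pvFold_eq_go]
  simp only [List.nil_append]
  congr 1
  set rs := new_rep.toList.foldl pvRleStep [] with hrs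
  have hexp : pvExpand rs = pvMask new_rep.toList := by rw [hrs]; exact pvExpand_runs _
  have hn : rs.foldl (fun a r => if r.1 then a else a + r.2) 0 = pvCF (pvMask new_rep.toList) := by
    rw [pvN_eq_cf rs 0, hexp]; omega
  rw [hn]
  set n := pvCF (pvMask new_rep.toList) with hndef
  have h1 : pvAGo seq.toList new_rep.toList 0 = pvMergeMask (pvMask new_rep.toList) (pvFit seq.toList n) := by
    apply pvGo_eq_merge
    intro k hk
    simpa using pvFit_spec seq.toList n k hk
  rw [h1]
  rw [pvPieces_render (pvFit seq.toList n) rs 0 (by rw [pvFit_length, hexp]; omega)]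
  rw [hexp, List.drop_zero]
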